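-- pv_equiv track=rewrite | github.com/astrovsky01/genome-deduplication | code/dedup_functions.py | decode_kmer
-- ===== SOURCE A (Python) =====
-- def decode_kmer(kmer_num, k):
--     char_map = {0:'A', 1:'C', 2:'G', 3:'T'}
--     kmer = []
--     for i in range(k):
--         nucleotide_code = kmer_num & 3 # 0x11
--         kmer.append(char_map[nucleotide_code])
--         kmer_num >>= 2
--     return ''.join(reversed(kmer))
-- ===== SOURCE B (Python) =====
-- def decode_kmer(kmer_num, k):
--     def rec(n, j):
--         # decode the low j bases of n, most significant first
--         if j <= 0:
--             return ''
--         if j == 1: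
--             return ['A', 'C', 'G', 'T'][n % 4]
--         h = j // 2
--         q, r = divmod(n, 1 << (2 * h))
--         return rec(q, j - h) + rec(r, h)
--     return rec(kmer_num, k)
-- ===== Notes on version B (the rewrite author's own statement) =====
-- stated objective: alternative
-- what changed: B decodes by divide and conquer: one divmod splits the k-mer number into its high and low halves, each decoded recursively down to single-base leaves indexed from a list, assembling the string in final order - instead of A's linear LSB-first mask-and-shift peel with a dict lookup followed by reversed().
import Mathlib
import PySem

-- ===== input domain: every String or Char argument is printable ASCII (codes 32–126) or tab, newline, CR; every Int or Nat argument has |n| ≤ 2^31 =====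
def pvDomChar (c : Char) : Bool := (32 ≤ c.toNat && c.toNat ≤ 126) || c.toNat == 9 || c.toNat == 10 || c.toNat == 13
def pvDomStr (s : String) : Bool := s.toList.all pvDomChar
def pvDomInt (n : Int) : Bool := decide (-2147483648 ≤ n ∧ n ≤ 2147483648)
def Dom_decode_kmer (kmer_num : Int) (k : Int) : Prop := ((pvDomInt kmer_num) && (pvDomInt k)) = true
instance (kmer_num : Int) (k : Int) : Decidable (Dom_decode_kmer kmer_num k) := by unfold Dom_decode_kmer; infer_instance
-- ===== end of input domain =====

-- B decodes by divide and conquer: divmod splits the k-mer into its high and low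
-- halves and each half is decoded recursively (single base at the leaves), the
-- string being assembled in final order — instead of A's linear LSB-first
-- bitmask/shift peel with a dict lookup followed by reversed().

-- ===== PORT A =====
-- char_map[code] never misses (code = x & 3 ∈ {0,1,2,3}), so the dict lookup is
-- ported as getD with an unreachable default "".
def decode_kmer (kmer_num : Int) (k : Int) : String :=
  let char_map : PySem.Dict Int String :=
    PySem.Dict.ofList [(0, "A"), (1, "C"), (2, "G"), (3, "T")]
  let st :=
    (PySem.List.pyRange 0 k 1).foldl
      (fun (st : List String × Int) _ =>
        let nucleotide_code := PySem.Int.band st.2 3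
        (st.1 ++ [char_map.getD nucleotide_code ""], st.2 >>> (2:Nat)))
      ([], kmer_num)
  PySem.Str.join "" st.1.reverse

-- ===== PORT B =====
-- Python B's inner 'rec'.  The list index n % 4 is always in [0,4), so indexing
-- is ported as pyGetD with an unreachable default ""; the shift amount 2*h is
-- > 0 in its branch, so '.toNat' on it is exact; divmod(n, m) is ported as the
-- pair (floordiv n m, mod n m).
def pvRecB (n : Int) (j : Int) : String :=
  if _hj0 : j ≤ 0 then "" else
  if _hj1 : j = 1 then PySem.List.pyGetD ["A", "C", "G", "T"] (PySem.Int.mod n 4) "" else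
    let h := PySem.Int.floordiv j 2
    let q := PySem.Int.floordiv n ((1 : Int) <<< (2 * h).toNat)
    let r := PySem.Int.mod n ((1 : Int) <<< (2 * h).toNat)
    pvRecB q (j - h) ++ pvRecB r h
termination_by j.toNat
decreasing_by
  · have hfd : PySem.Int.floordiv j 2 = j / 2 := PySem.Int.floordiv_eq_ediv_of_pos (by norm_num)
    simp only [hfd]; omega
  · have hfd : PySem.Int.floordiv j 2 = j / 2 := PySem.Int.floordiv_eq_ediv_of_pos (by norm_num)
    simp only [hfd]; omega

def decode_kmer_alt (kmer_num : Int) (k : Int) : String :=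
  pvRecB kmer_num k

-- ===== PRECONDITION & SPEC =====
def Spec_decode_kmer (kmer_num : Int) (k : Int) (out : String) : Prop := out = decode_kmer_alt kmer_num k
instance (kmer_num : Int) (k : Int) (out : String) : Decidable (Spec_decode_kmer kmer_num k out) := by unfold Spec_decode_kmer; infer_instance

-- ===== CLAIM (what is proved, stated in full; the proofs are below) =====
def Claim_equal_decode_kmer : Prop := ∀ (kmer_num : Int) (k : Int), Dom_decode_kmer kmer_num k → Spec_decode_kmer kmer_num k (decode_kmer kmer_num k)

-- ===== LEMMAS AND PROOFS =====

-- the character (1-char string) A emits for the low two bits of x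
def pvC (x : Int) : String :=
  PySem.Dict.getD (PySem.Dict.ofList [((0 : Int), "A"), (1, "C"), (2, "G"), (3, "T")])
    (PySem.Int.band x 3) ""

def pvBase : List String := ["A", "C", "G", "T"]

-- base-4 digit j of x, as the character list of the emitted base
def pvE (x : Int) (j : Nat) : List Char :=
  (PySem.List.pyGetD pvBase (x / 4^j % 4) "").toList

theorem pv_band3 (x : Int) : PySem.Int.band x 3 = x % 4 := by
  have h4 : ∀ n : Nat, n &&& 3 = n % 4 := by
    intro n; simpa using Nat.and_two_pow_sub_one_eq_mod n 2
  simp only [PySem.Int.band]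
  norm_num
  split_ifs with h
  · rw [show (3:Int).toNat = 3 from rfl, h4]; omega
  · rw [show (3:Int).toNat = 3 from rfl, Nat.and_comm, h4]; omega

theorem pv_shift (x : Int) (j : Nat) : x >>> (2*j) = x / 4^j := by
  rw [Int.shiftRight_eq_div_pow]
  norm_num [pow_mul]

theorem pv_shift_shift (x : Int) (j : Nat) : (x >>> (2:Nat)) >>> (2*j) = x >>> (2*(j+1)) := by
  rw [show 2*(j+1) = 2 + 2*j from by omega, Int.shiftRight_add]

-- A's loop: the accumulated list is the LSB-first character list
theorem pvA_fold (l : List Int) : ∀ (acc : List String) (x : Int),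
    (l.foldl
      (fun (st : List String × Int) (_ : Int) =>
        (st.1 ++ [(PySem.Dict.ofList [((0:Int),"A"),(1,"C"),(2,"G"),(3,"T")]).getD
          (PySem.Int.band st.2 3) ""], st.2 >>> (2:Nat)))
      (acc, x)).1
      = acc ++ (List.range l.length).map (fun j => pvC (x >>> (2 * j : Nat))) := by
  induction l with
  | nil => simp
  | cons a l ih =>
    intro acc x
    simp only [List.foldl_cons, ih, List.length_cons, List.range_succ_eq_map, List.map_cons,
      List.map_map]
    simp [Function.comp_def, pv_shift_shift, pvC, List.append_assoc]

-- reversing a map over range flips the index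
theorem pv_rev_map_range (F : Nat → String) : ∀ (n : Nat),
    ((List.range n).map F).reverse = (List.range n).map (fun j => F (n - 1 - j)) := by
  intro n
  induction n with
  | zero => simp
  | succ n ih =>
    calc ((List.range (n+1)).map F).reverse
        = F n :: ((List.range n).map F).reverse := by rw [List.range_succ]; simp
      _ = F n :: (List.range n).map (fun j => F (n - 1 - j)) := by rw [ih]
      _ = (List.range (n+1)).map (fun j => F (n + 1 - 1 - j)) := by
          rw [List.range_succ_eq_map]
          simp only [List.map_cons, List.map_map, Function.comp_def]
          refine congrArg₂ List.cons (congrArg F (by omega))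
            (List.map_congr_left fun j _ => congrArg F (by omega))

-- the character A emits at shift 2*j is base-4 digit j rendered through pvBase
theorem pvC_toList (x : Int) (j : Nat) : (pvC (x >>> (2*j))).toList = pvE x j := by
  unfold pvC pvE
  rw [pv_band3, pv_shift]
  have h0 : 0 ≤ x / 4^j % 4 := by omega
  have h1 : x / 4^j % 4 < 4 := by omega
  set t := x / 4^j % 4 with ht
  have hc : t = 0 ∨ t = 1 ∨ t = 2 ∨ t = 3 := by omega
  rcases hc with h|h|h|h <;> rw [h] <;> decide

-- ''.join concatenates
theorem pv_chars_join_nil (ls : List (List Char)) : PySem.Chars.join [] ls = ls.flatten := by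
  induction ls with
  | nil => simp [PySem.Chars.join_nil]
  | cons a rest ih =>
    cases rest with
    | nil => simp [PySem.Chars.join_singleton]
    | cons b r => rw [PySem.Chars.join_cons_cons, ih]; simp

theorem pv_join_eq (l : List String) :
    PySem.Str.join "" l = String.ofList ((l.map String.toList).flatten) := by
  unfold PySem.Str.join
  rw [show ("" : String).toList = [] from rfl, pv_chars_join_nil]

-- B's recursion: MSB-first digit list of the low jn digits
def pvM (x : Int) (jn : Nat) : List Char :=
  (List.range jn).flatMap (fun i => pvE x (jn - 1 - i))

theorem pv_digit_div (x : Int) (hn i : Nat) : pvE (x / 4^hn) i = pvE x (hn + i) := by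
  unfold pvE
  rw [Int.ediv_ediv_of_nonneg (by positivity), ← pow_add]

theorem pv_digit_mod (x : Int) (hn i : Nat) (hi : i < hn) : pvE (x % 4^hn) i = pvE x i := by
  unfold pvE
  have key : (x % 4^hn) / 4^i % 4 = x / 4^i % 4 := by
    set d := x / 4^hn with hd
    have hpow : (4:Int)^hn = 4^i * 4^(hn-i) := by
      rw [← pow_add]; congr 1; omega
    have h1 : x % 4^hn = x + (-(4^(hn-i)*d)) * 4^i := by
      calc x % 4^hn = x - 4^hn * d := Int.emod_def x _
        _ = x + (-(4^(hn-i)*d)) * 4^i := by rw [hpow]; ring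
    rw [h1, Int.add_mul_ediv_right _ _ (by positivity : ((4:Int)^i) ≠ 0)]
    have h2 : (4:Int)^(hn-i) = 4 * 4^(hn-i-1) := by
      rw [← pow_succ']; congr 1; omega
    rw [h2, mul_assoc]
    generalize (4:Int)^(hn-i-1) * d = w
    omega
  rw [key]

theorem pvM_split (x : Int) (jn hn : Nat) (h1 : 1 ≤ hn) (h2 : hn < jn) :
    pvM x jn = pvM (x / 4^hn) (jn - hn) ++ pvM (x % 4^hn) hn := by
  unfold pvM
  conv_lhs => rw [show jn = (jn - hn) + hn from by omega, List.range_add]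
  rw [List.flatMap_append, List.flatMap_map]
  congr 1
  · rw [List.flatMap_def, List.flatMap_def]
    refine congrArg List.flatten (List.map_congr_left fun i hi => ?_)
    simp only [List.mem_range] at hi
    rw [pv_digit_div]
    exact congrArg (pvE x) (by omega)
  · rw [List.flatMap_def, List.flatMap_def]
    refine congrArg List.flatten (List.map_congr_left fun i hi => ?_)
    simp only [List.mem_range] at hi
    rw [pv_digit_mod x hn _ (by omega)]
    exact congrArg (pvE x) (by omega)

theorem pvRecB_toList (jn : Nat) : ∀ (j x : Int), j.toNat = jn → (pvRecB x j).toList = pvM x jn := by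
  induction jn using Nat.strong_induction_on with
  | _ jn ih =>
    intro j x hj
    rw [pvRecB]
    split_ifs with h0 h1
    · have h : jn = 0 := by omega
      subst h; simp [pvM]
    · have h : jn = 1 := by omega
      subst h
      rw [PySem.Int.mod_eq_emod_of_pos (by norm_num)]
      simp [pvM, pvE, pvBase]
    · have hj2 : 2 ≤ j := by omega
      have hfd : PySem.Int.floordiv j 2 = j / 2 := PySem.Int.floordiv_eq_ediv_of_pos (by norm_num)
      have hsh : ((1:Int) <<< (2 * PySem.Int.floordiv j 2).toNat) = 4 ^ ((j/2).toNat) := by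
        rw [hfd, show (2 * (j/2)).toNat = 2 * (j/2).toNat from by omega]
        simp [Int.shiftLeft_eq, pow_mul]
      simp only [hsh]
      rw [PySem.Int.floordiv_eq_ediv_of_pos (by positivity),
        PySem.Int.mod_eq_emod_of_pos (by positivity), String.toList_append]
      rw [ih ((j - PySem.Int.floordiv j 2).toNat) (by rw [hfd]; omega) _ _ rfl,
        ih ((PySem.Int.floordiv j 2).toNat) (by rw [hfd]; omega) _ _ rfl]
      rw [hfd]
      rw [show (j - j/2).toNat = jn - (j/2).toNat from by omega]
      exact (pvM_split x jn ((j/2).toNat) (by omega) (by omega)).symm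

-- ===== VERDICT (by name: the statement is the Claim_ definition above) =====
theorem decode_kmer_spec : Claim_equal_decode_kmer := by
  intro x k _
  simp only [Spec_decode_kmer, decode_kmer, decode_kmer_alt]
  rw [pvA_fold, List.nil_append, PySem.List.pyRange_one]
  simp only [List.length_map, List.length_range, Int.sub_zero]
  rw [pv_rev_map_range, pv_join_eq, List.map_map]
  rw [show (String.toList ∘ fun j => pvC (x >>> (2 * (k.toNat - 1 - j))))
        = fun j => pvE x (k.toNat - 1 - j) from funext fun j => pvC_toList x _]
  conv_rhs => rw [← String.ofList_toList (s := pvRecB x k), pvRecB_toList k.toNat k x rfl]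
  refine congrArg String.ofList ?_
  rw [pvM, List.flatMap_def]
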